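-- pv_equiv track=rewrite | github.com/elyousfy/rfq-proposal-system | backend/proposal_generator.py | find_original_template_section
-- ===== SOURCE A (Python) =====
-- from typing import List, Dict, Any, Optional
--
-- def find_original_template_section(section_title: str, template_data: Dict[str, Any]) -> str:
--     """Find the original template section content that matches the given title."""
--
--     if not template_data or "original_sections" not in template_data:
--         return None
--
--     original_sections = template_data["original_sections"]
--
--     # Try exact match first
--     for section in original_sections:
--         if section.get("title", "").strip().lower() == section_title.strip().lower():
--             return section.get("content_text", "")
--
--     # Try partial match
--     for section in original_sections:
--         original_title = section.get("title", "").strip().lower()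
--         search_title = section_title.strip().lower()
--         if search_title in original_title or original_title in search_title:
--             return section.get("content_text", "")
--
--     # Try keyword matching for similar sections
--     keywords = section_title.lower().split()
--     for section in original_sections:
--         original_title = section.get("title", "").strip().lower()
--         if any(keyword in original_title for keyword in keywords if len(keyword) > 3):
--             return section.get("content_text", "")
--
--     return None
-- ===== SOURCE B (Python) =====
-- from typing import Dict, Any
--
-- def find_original_template_section(section_title: str, template_data: Dict[str, Any]) -> str:
--     """Single pass: return exact match immediately; remember the first partial
--     and first keyword match as fallbacks, resolved after the loop."""
--     if not template_data or "original_sections" not in template_data: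
--         return None
--
--     search_title = section_title.strip().lower()
--     keywords = [k for k in section_title.lower().split() if len(k) > 3]
--
--     partial_hit = None
--     keyword_hit = None
--     for section in template_data["original_sections"]:
--         title = section.get("title", "").strip().lower()
--         if title == search_title:
--             return section.get("content_text", "")
--         if partial_hit is None and (search_title in title or title in search_title):
--             partial_hit = (section.get("content_text", ""),)
--         if keyword_hit is None and any(k in title for k in keywords):
--             keyword_hit = (section.get("content_text", ""),)
--
--     if partial_hit is not None:
--         return partial_hit[0]
--     if keyword_hit is not None:
--         return keyword_hit[0]
--     return None
-- ===== Notes on version B (the rewrite author's own statement) =====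
-- stated objective: alternative
-- what changed: A makes three sequential scans over original_sections (exact, then partial, then keyword); B makes a single pass that returns an exact match immediately and records the first partial and first keyword candidates to resolve after the loop.
import Mathlib
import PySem

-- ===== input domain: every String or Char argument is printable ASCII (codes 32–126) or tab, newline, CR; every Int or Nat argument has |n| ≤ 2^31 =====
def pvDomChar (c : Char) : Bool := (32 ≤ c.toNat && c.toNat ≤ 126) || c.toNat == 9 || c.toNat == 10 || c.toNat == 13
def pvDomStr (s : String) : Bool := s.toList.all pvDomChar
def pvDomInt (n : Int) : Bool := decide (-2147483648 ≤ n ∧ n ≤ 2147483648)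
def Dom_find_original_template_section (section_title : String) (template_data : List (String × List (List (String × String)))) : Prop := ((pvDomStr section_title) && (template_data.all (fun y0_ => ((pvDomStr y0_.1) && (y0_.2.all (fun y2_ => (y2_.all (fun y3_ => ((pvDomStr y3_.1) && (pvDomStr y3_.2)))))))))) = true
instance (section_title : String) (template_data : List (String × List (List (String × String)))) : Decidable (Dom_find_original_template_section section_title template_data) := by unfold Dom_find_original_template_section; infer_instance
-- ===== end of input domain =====

-- B replaces A's three sequential scans by a single pass that returns an exact match
-- immediately and records the first partial / keyword candidates (objective: alternative).

-- ===== PORT A =====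
-- first loop: exact match on normalized titles
def pvA_exact (section_title : String) : List (List (String × String)) → Option String
  | [] => none
  | s :: rest =>
    if PySem.Str.lower (PySem.Str.strip (PySem.Dict.getD (PySem.Dict.mk s) "title" ""))
        = PySem.Str.lower (PySem.Str.strip section_title) then
      some (PySem.Dict.getD (PySem.Dict.mk s) "content_text" "")
    else pvA_exact section_title rest

-- second loop: substring either way
def pvA_partial (section_title : String) : List (List (String × String)) → Option String
  | [] => none
  | s :: rest =>
    let original_title := PySem.Str.lower (PySem.Str.strip (PySem.Dict.getD (PySem.Dict.mk s) "title" ""))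
    let search_title := PySem.Str.lower (PySem.Str.strip section_title)
    if PySem.Str.isIn search_title original_title || PySem.Str.isIn original_title search_title then
      some (PySem.Dict.getD (PySem.Dict.mk s) "content_text" "")
    else pvA_partial section_title rest

-- third loop: any keyword of length > 3 occurring in the title
def pvA_keyword (keywords : List String) : List (List (String × String)) → Option String
  | [] => none
  | s :: rest =>
    let original_title := PySem.Str.lower (PySem.Str.strip (PySem.Dict.getD (PySem.Dict.mk s) "title" ""))
    if (keywords.filter (fun kw => PySem.Str.len kw > 3)).any
        (fun kw => PySem.Str.isIn kw original_title) then
      some (PySem.Dict.getD (PySem.Dict.mk s) "content_text" "")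
    else pvA_keyword keywords rest

def find_original_template_section (section_title : String) (template_data : List (String × List (List (String × String)))) : Option String :=
  if template_data = [] then none
  else if (PySem.Dict.mk template_data).contains "original_sections" = false then none
  else
    let original_sections := PySem.Dict.getD (PySem.Dict.mk template_data) "original_sections" []
    match pvA_exact section_title original_sections with
    | some c => some c
    | none =>
      match pvA_partial section_title original_sections with
      | some c => some c
      | none =>
        let keywords := PySem.Str.split₀ (PySem.Str.lower section_title)
        match pvA_keyword keywords original_sections with
        | some c => some c
        | none => none

-- ===== PORT B =====
-- single pass: exact match returns at once; first partial and first keyword hits are kept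
def pvB_loop (search_title : String) (keywords : List String)
    (partialHit keywordHit : Option String) : List (List (String × String)) → Option String
  | [] =>
    match partialHit with
    | some c => some c
    | none =>
      match keywordHit with
      | some c => some c
      | none => none
  | s :: rest =>
    let title := PySem.Str.lower (PySem.Str.strip (PySem.Dict.getD (PySem.Dict.mk s) "title" ""))
    if title = search_title then some (PySem.Dict.getD (PySem.Dict.mk s) "content_text" "")
    else
      let partialHit' :=
        if partialHit.isNone && (PySem.Str.isIn search_title title || PySem.Str.isIn title search_title) then
          some (PySem.Dict.getD (PySem.Dict.mk s) "content_text" "")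
        else partialHit
      let keywordHit' :=
        if keywordHit.isNone && keywords.any (fun kw => PySem.Str.isIn kw title) then
          some (PySem.Dict.getD (PySem.Dict.mk s) "content_text" "")
        else keywordHit
      pvB_loop search_title keywords partialHit' keywordHit' rest

def find_original_template_section_alt (section_title : String) (template_data : List (String × List (List (String × String)))) : Option String :=
  if template_data = [] then none
  else if (PySem.Dict.mk template_data).contains "original_sections" = false then none
  else
    let search_title := PySem.Str.lower (PySem.Str.strip section_title)
    let keywords := (PySem.Str.split₀ (PySem.Str.lower section_title)).filter
      (fun kw => PySem.Str.len kw > 3)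
    pvB_loop search_title keywords none none
      (PySem.Dict.getD (PySem.Dict.mk template_data) "original_sections" [])

-- ===== PRECONDITION & SPEC =====
def Spec_find_original_template_section (section_title : String) (template_data : List (String × List (List (String × String)))) (out : Option String) : Prop := out = find_original_template_section_alt section_title template_data
instance (section_title : String) (template_data : List (String × List (List (String × String)))) (out : Option String) : Decidable (Spec_find_original_template_section section_title template_data out) := by unfold Spec_find_original_template_section; infer_instance

-- ===== CLAIM (what is proved, stated in full; the proofs are below) =====
def Claim_equal_find_original_template_section : Prop := ∀ (section_title : String) (template_data : List (String × List (List (String × String)))), Dom_find_original_template_section section_title template_data → Spec_find_original_template_section section_title template_data (find_original_template_section section_title template_data)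

-- ===== LEMMAS AND PROOFS =====

-- the loop invariant: B's single pass with candidates p, k computes A's three-scan
-- result with p, k taking precedence over the remaining partial / keyword scans
theorem pvB_loop_eq (section_title : String) (kwraw : List String)
    (sections : List (List (String × String))) (p k : Option String) :
    pvB_loop (PySem.Str.lower (PySem.Str.strip section_title))
        (kwraw.filter (fun kw => PySem.Str.len kw > 3)) p k sections =
      (pvA_exact section_title sections).or
        ((p.or (pvA_partial section_title sections)).or
          (k.or (pvA_keyword kwraw sections))) := by
  induction sections generalizing p k with
  | nil =>
    cases p <;> cases k <;> simp [pvB_loop, pvA_exact, pvA_partial, pvA_keyword]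
  | cons s rest ih =>
    simp only [pvB_loop, pvA_exact, pvA_partial, pvA_keyword]
    by_cases hx : PySem.Str.lower (PySem.Str.strip (PySem.Dict.getD (PySem.Dict.mk s) "title" ""))
        = PySem.Str.lower (PySem.Str.strip section_title)
    · simp [hx]
    · simp only [hx, if_false]
      rw [ih]
      cases p <;> cases k <;>
        simp [Option.or] <;> split_ifs <;> simp_all [Option.or]

-- ===== VERDICT (by name: the statement is the Claim_ definition above) =====
theorem find_original_template_section_spec : Claim_equal_find_original_template_section := by
  intro section_title template_data _
  unfold Spec_find_original_template_section
  unfold find_original_template_section find_original_template_section_alt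
  by_cases h0 : template_data = []
  · simp [h0]
  · simp only [h0, ite_false]
    by_cases h1 : (PySem.Dict.mk template_data).contains "original_sections" = false
    · simp [h1]
    · simp only [h1, ite_false]
      rw [pvB_loop_eq]
      cases hx : pvA_exact section_title (PySem.Dict.getD (PySem.Dict.mk template_data) "original_sections" []) <;>
        cases hp : pvA_partial section_title (PySem.Dict.getD (PySem.Dict.mk template_data) "original_sections" []) <;>
          cases hk : pvA_keyword (PySem.Str.split₀ (PySem.Str.lower section_title)) (PySem.Dict.getD (PySem.Dict.mk template_data) "original_sections" []) <;>
            simp [Option.or]
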